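-- pv_equiv track=rewrite | github.com/camillegeorgiou/kibana-search-project | elasticapp.py | filter_results_by_tags
-- ===== SOURCE A (Python) =====
-- def filter_results_by_tags(results, selected_tags):
--     filtered_results = []
--     for result_item in results:
--         tags = result_item.get('tags', {})
--         add_result = True
--         for tag_type, selected_values in selected_tags.items():
--             if selected_values:
--                 result_values = tags.get(tag_type, [])
--                 if not any(value in selected_values for value in result_values):
--                     add_result = False
--                     break
--         if add_result:
--             filtered_results.append(result_item)
--     return filtered_results
-- ===== SOURCE B (Python) =====
-- def filter_results_by_tags(results, selected_tags):
--     filtered = list(results)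
--     for tag_type, selected_values in selected_tags.items():
--         if selected_values:
--             filtered = [r for r in filtered
--                         if any(v in selected_values for v in r.get('tags', {}).get(tag_type, []))]
--     return filtered
-- ===== Notes on version B (the rewrite author's own statement) =====
-- stated objective: alternative
-- what changed: Swapped the loop nesting: instead of one pass over results with an inner per-result constraint loop and early break, B applies one order-preserving filtering pass per non-empty tag_type to a shrinking working list.
import Mathlib
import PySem

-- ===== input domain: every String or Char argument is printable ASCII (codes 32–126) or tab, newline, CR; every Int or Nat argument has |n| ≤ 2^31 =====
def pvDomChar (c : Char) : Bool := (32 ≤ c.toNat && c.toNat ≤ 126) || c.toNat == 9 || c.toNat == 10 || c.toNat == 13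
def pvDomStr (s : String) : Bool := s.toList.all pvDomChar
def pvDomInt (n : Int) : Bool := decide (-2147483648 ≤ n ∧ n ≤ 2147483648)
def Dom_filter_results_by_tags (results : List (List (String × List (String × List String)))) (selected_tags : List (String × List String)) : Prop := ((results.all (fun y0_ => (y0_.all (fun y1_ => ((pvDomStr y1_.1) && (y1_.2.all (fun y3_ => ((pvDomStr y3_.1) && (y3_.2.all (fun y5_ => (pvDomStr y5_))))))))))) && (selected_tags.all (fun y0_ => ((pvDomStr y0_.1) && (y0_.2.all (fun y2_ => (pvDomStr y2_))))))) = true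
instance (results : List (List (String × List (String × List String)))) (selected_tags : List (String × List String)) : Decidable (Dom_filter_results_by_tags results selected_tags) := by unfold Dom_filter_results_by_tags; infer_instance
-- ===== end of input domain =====

-- B swaps the loop nesting: one order-preserving filter pass per non-empty tag_type over a shrinking list, instead of a per-result inner constraint loop with early break (alternative decomposition, same cost).


-- ===== PORT A =====
def pvCheckA (tags : List (String × List String)) : List (String × List String) → Bool
  | [] => true
  | (tag_type, selected_values) :: rest =>
      if selected_values ≠ [] then
        if ¬ (((PySem.Dict.mk tags).getD tag_type []).any (fun value => selected_values.contains value)) then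
          false
        else pvCheckA tags rest
      else pvCheckA tags rest

def filter_results_by_tags (results : List (List (String × List (String × List String)))) (selected_tags : List (String × List String)) : List (List (String × List (String × List String))) :=
  results.foldl (fun filtered_results result_item =>
    if pvCheckA ((PySem.Dict.mk result_item).getD "tags" []) selected_tags then
      filtered_results ++ [result_item]
    else filtered_results) []

-- ===== PORT B =====
def filter_results_by_tags_alt (results : List (List (String × List (String × List String)))) (selected_tags : List (String × List String)) : List (List (String × List (String × List String))) :=
  selected_tags.foldl (fun filtered tv =>
    if tv.2 ≠ [] then
      filtered.filter (fun r =>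
        (((PySem.Dict.mk ((PySem.Dict.mk r).getD "tags" [])).getD tv.1 []).any
          (fun v => tv.2.contains v)))
    else filtered) results

-- ===== PRECONDITION & SPEC =====
def Spec_filter_results_by_tags (results : List (List (String × List (String × List String)))) (selected_tags : List (String × List String)) (out : List (List (String × List (String × List String)))) : Prop := out = filter_results_by_tags_alt results selected_tags
instance (results : List (List (String × List (String × List String)))) (selected_tags : List (String × List String)) (out : List (List (String × List (String × List String)))) : Decidable (Spec_filter_results_by_tags results selected_tags out) := by unfold Spec_filter_results_by_tags; infer_instance

-- ===== CLAIM (what is proved, stated in full; the proofs are below) =====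
def Claim_equal_filter_results_by_tags : Prop := ∀ (results : List (List (String × List (String × List String)))) (selected_tags : List (String × List String)), Dom_filter_results_by_tags results selected_tags → Spec_filter_results_by_tags results selected_tags (filter_results_by_tags results selected_tags)

-- ===== LEMMAS AND PROOFS =====

-- ===== VERDICT (by name: the statement is the Claim_ definition above) =====
lemma alt_eq_filter (sel : List (String × List String)) (rs : List (List (String × List (String × List String)))) :
    filter_results_by_tags_alt rs sel =
      rs.filter (fun r => pvCheckA ((PySem.Dict.mk r).getD "tags" []) sel) := by
  induction sel generalizing rs with
  | nil => simp [filter_results_by_tags_alt, pvCheckA]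
  | cons tv rest ih =>
      obtain ⟨t, v⟩ := tv
      simp only [filter_results_by_tags_alt, List.foldl_cons]
      refine Eq.trans (ih _) ?_
      by_cases hv : v = []
      · subst hv
        rw [if_neg (by simp : ¬ ((t, ([] : List String)).2 ≠ []))]
        apply List.filter_congr
        intro r _
        simp [pvCheckA]
      · rw [if_pos (by simpa using hv : ¬ ((t, v).2 = [])), List.filter_filter]
        apply List.filter_congr
        intro r _
        by_cases h : ∃ x ∈ (PySem.Dict.mk ((PySem.Dict.mk r).getD "tags" [])).getD t [], x ∈ v
        · simp [pvCheckA, hv, List.any_eq_true, h]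
        · push Not at h
          have h1 : (((PySem.Dict.mk ((PySem.Dict.mk r).getD "tags" [])).getD t []).any
              fun w => decide (w ∈ v)) = false := by
            simp only [List.any_eq_false, decide_eq_true_eq]
            exact h
          simp [pvCheckA, hv, h1]

theorem filter_results_by_tags_spec : Claim_equal_filter_results_by_tags := by
  intro results selected_tags _
  unfold Spec_filter_results_by_tags
  rw [alt_eq_filter]
  unfold filter_results_by_tags
  rw [PySem.List.foldl_append_if_eq_filter]
  simp
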